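-- pv_equiv track=rewrite | github.com/SergeMoisan/There_is_no_spoon | version_2.py | lower_neighbourg
-- ===== SOURCE A (Python) =====
-- h = 3
--
-- def lower_neighbourg(node, nodes):
--     x = node[0]
--     y = node[1]
--     for y_p in range(y+1, h+1):
--         if [x, y_p] in nodes:
--             voisin_dessous = [x, y_p]
--             return(voisin_dessous)
--     return [-1, -1]
-- ===== SOURCE B (Python) =====
-- h = 3
--
-- def lower_neighbourg(node, nodes):
--     x = node[0]
--     y = node[1]
--     ys = [p[1] for p in nodes if len(p) == 2 and p[0] == x and y < p[1] <= h]
--     return [x, min(ys)] if ys else [-1, -1]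
-- ===== Notes on version B (the rewrite author's own statement) =====
-- stated objective: alternative
-- what changed: B scans the node list once, collecting the y-values of nodes in the same column within (y, h], and returns the minimum, instead of A's ascending membership probes [x,y_p] in nodes for each y_p in range(y+1, h+1).
import Mathlib
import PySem

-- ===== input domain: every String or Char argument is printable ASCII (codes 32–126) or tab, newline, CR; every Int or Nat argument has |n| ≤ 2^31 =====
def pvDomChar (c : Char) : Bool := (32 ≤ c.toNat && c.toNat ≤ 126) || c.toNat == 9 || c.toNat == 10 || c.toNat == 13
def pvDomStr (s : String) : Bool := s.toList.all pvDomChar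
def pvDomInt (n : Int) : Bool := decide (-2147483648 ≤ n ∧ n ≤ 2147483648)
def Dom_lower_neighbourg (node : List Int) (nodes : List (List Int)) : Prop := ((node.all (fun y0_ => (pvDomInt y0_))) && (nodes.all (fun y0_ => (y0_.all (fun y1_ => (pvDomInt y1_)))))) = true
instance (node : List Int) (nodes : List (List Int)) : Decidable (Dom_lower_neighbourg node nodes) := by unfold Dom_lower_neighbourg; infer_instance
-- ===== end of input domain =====

-- B scans the node list once and returns the minimum matching y-value instead of A's
-- ascending membership probes; equivalence is proved on nodes of length ≥ 2 (Pre_).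

-- ===== PORT A =====
-- the for-loop with early return: first y_p in the range with [x, y_p] ∈ nodes
def lnLoop (x : Int) (nodes : List (List Int)) : List Int → List Int
  | [] => [-1, -1]
  | yp :: rest => if [x, yp] ∈ nodes then [x, yp] else lnLoop x nodes rest

def lower_neighbourg (node : List Int) (nodes : List (List Int)) : List Int :=
  let x := (PySem.List.pyGet? node 0).getD 0
  let y := (PySem.List.pyGet? node 1).getD 0
  lnLoop x nodes (PySem.List.pyRange (y + 1) (3 + 1) 1)

-- ===== PORT B =====
def lower_neighbourg_alt (node : List Int) (nodes : List (List Int)) : List Int :=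
  let x := (PySem.List.pyGet? node 0).getD 0
  let y := (PySem.List.pyGet? node 1).getD 0
  let ys := nodes.filterMap (fun p =>
    if p.length = 2 ∧ (PySem.List.pyGet? p 0).getD 0 = x ∧
       y < (PySem.List.pyGet? p 1).getD 0 ∧ (PySem.List.pyGet? p 1).getD 0 ≤ 3
    then some ((PySem.List.pyGet? p 1).getD 0) else none)
  match PySem.List.min? ys (fun v => v) with
  | some m => [x, m]
  | none => [-1, -1]

-- ===== PRECONDITION & SPEC =====
-- Python A raises IndexError on node[0]/node[1] when node has fewer than two elements.
def Pre_lower_neighbourg (node : List Int) (nodes : List (List Int)) : Prop := 2 ≤ node.length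
instance (node : List Int) (nodes : List (List Int)) : Decidable (Pre_lower_neighbourg node nodes) := by unfold Pre_lower_neighbourg; infer_instance
def pvWitness_lower_neighbourg : List Int × List (List Int) := ([0, 1], [[0, 2], [1, 3]])

def Spec_lower_neighbourg (node : List Int) (nodes : List (List Int)) (out : List Int) : Prop := out = lower_neighbourg_alt node nodes
instance (node : List Int) (nodes : List (List Int)) (out : List Int) : Decidable (Spec_lower_neighbourg node nodes out) := by unfold Spec_lower_neighbourg; infer_instance

-- ===== CLAIM (what is proved, stated in full; the proofs are below) =====
def Claim_equal_lower_neighbourg : Prop := ∀ (node : List Int) (nodes : List (List Int)), Dom_lower_neighbourg node nodes → Pre_lower_neighbourg node nodes → Spec_lower_neighbourg node nodes (lower_neighbourg node nodes)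

-- ===== LEMMAS AND PROOFS =====

-- membership in B's collected list ys
theorem mem_ys (x y v : Int) (nodes : List (List Int)) :
    v ∈ nodes.filterMap (fun p =>
      if p.length = 2 ∧ (PySem.List.pyGet? p 0).getD 0 = x ∧
         y < (PySem.List.pyGet? p 1).getD 0 ∧ (PySem.List.pyGet? p 1).getD 0 ≤ 3
      then some ((PySem.List.pyGet? p 1).getD 0) else none)
    ↔ (y < v ∧ v ≤ 3 ∧ [x, v] ∈ nodes) := by
  simp only [List.mem_filterMap]
  constructor
  · rintro ⟨p, hp, hif⟩
    split_ifs at hif with hc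
    · obtain ⟨hlen, hx, hy, h3⟩ := hc
      have hv := Option.some.inj hif
      match p, hlen with
      | [a, b], _ =>
        have h1 : (PySem.List.pyGet? ([a, b] : List Int) 1).getD 0 = b := by
          simp [PySem.List.pyGet?, PySem.List.pyIdx?]
        have h0 : (PySem.List.pyGet? ([a, b] : List Int) 0).getD 0 = a := by
          simp [PySem.List.pyGet?, PySem.List.pyIdx?]
        rw [h0] at hx
        rw [h1] at hv hy h3
        subst hx; subst hv
        exact ⟨hy, h3, hp⟩
  · rintro ⟨hy, h3, hmem⟩
    refine ⟨[x, v], hmem, ?_⟩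
    have h0 : (PySem.List.pyGet? ([x, v] : List Int) 0).getD 0 = x := by
      simp [PySem.List.pyGet?, PySem.List.pyIdx?]
    have h1 : (PySem.List.pyGet? ([x, v] : List Int) 1).getD 0 = v := by
      simp [PySem.List.pyGet?, PySem.List.pyIdx?]
    rw [if_pos ⟨rfl, h0, by rw [h1]; exact hy, by rw [h1]; exact h3⟩, h1]

-- A's loop returns [x, head of the filtered list] (first match), or [-1,-1]
theorem lnLoop_eq_filter (x : Int) (nodes : List (List Int)) (L : List Int) :
    lnLoop x nodes L =
      match L.filter (fun v => decide ([x, v] ∈ nodes)) with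
      | [] => [-1, -1]
      | m :: _ => [x, m] := by
  induction L with
  | nil => rfl
  | cons a t ih =>
    by_cases hm : [x, a] ∈ nodes
    · simp [lnLoop, hm, List.filter]
    · simp [lnLoop, hm, List.filter, ih]

-- min? of a list returns its least value
theorem min?_of_least (l : List Int) (m : Int) (hm : m ∈ l) (hle : ∀ v ∈ l, m ≤ v) :
    PySem.List.min? l (fun v => v) = some m := by
  match hmin : PySem.List.min? l (fun v => v) with
  | none =>
    rw [PySem.List.min?_eq_none_iff] at hmin
    subst hmin; cases hm
  | some m' =>
    have hm'mem : m' ∈ l := PySem.List.min?_mem hmin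
    have h1 : m ≤ m' := hle m' hm'mem
    have h2 : m' ≤ m := PySem.List.min?_isMin hmin m hm
    rw [le_antisymm h2 h1]

-- a strictly sorted list and any list with the same members: head = min
theorem head_eq_min (x : Int) (F ys : List Int)
    (hmem : ∀ v, v ∈ F ↔ v ∈ ys) (hsorted : F.Pairwise (· < ·)) :
    (match F with | [] => ([-1, -1] : List Int) | m :: _ => [x, m]) =
    (match PySem.List.min? ys (fun v => v) with
     | some m => [x, m] | none => [-1, -1]) := by
  cases F with
  | nil =>
    have : ys = [] := by
      apply List.eq_nil_iff_forall_not_mem.mpr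
      intro v hv
      exact absurd ((hmem v).mpr hv) (List.not_mem_nil)
    rw [this, (PySem.List.min?_eq_none_iff [] _).mpr rfl]
  | cons m rest =>
    have hleast : ∀ v ∈ ys, m ≤ v := by
      intro v hv
      rcases List.mem_cons.mp ((hmem v).mpr hv) with h | h
      · omega
      · exact le_of_lt ((List.pairwise_cons.mp hsorted).1 v h)
    have hmys : m ∈ ys := (hmem m).mp (List.mem_cons_self ..)
    rw [min?_of_least ys m hmys hleast]

-- the core equivalence for arbitrary x, y
theorem core (x y : Int) (nodes : List (List Int)) :
    lnLoop x nodes (PySem.List.pyRange (y + 1) (3 + 1) 1) =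
      match PySem.List.min? (nodes.filterMap (fun p =>
        if p.length = 2 ∧ (PySem.List.pyGet? p 0).getD 0 = x ∧
           y < (PySem.List.pyGet? p 1).getD 0 ∧ (PySem.List.pyGet? p 1).getD 0 ≤ 3
        then some ((PySem.List.pyGet? p 1).getD 0) else none)) (fun v => v) with
      | some m => [x, m]
      | none => [-1, -1] := by
  rw [lnLoop_eq_filter]
  apply head_eq_min
  · intro v
    rw [mem_ys]
    simp only [List.mem_filter, PySem.List.mem_pyRange_one, decide_eq_true_eq]
    constructor
    · rintro ⟨⟨h1, h2⟩, h3⟩; exact ⟨by omega, by omega, h3⟩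
    · rintro ⟨h1, h2, h3⟩; exact ⟨⟨by omega, by omega⟩, h3⟩
  · exact List.Pairwise.filter _ (PySem.List.pairwise_lt_pyRange_one (y + 1) (3 + 1))

-- ===== VERDICT (by name: the statement is the Claim_ definition above) =====
theorem lower_neighbourg_spec : Claim_equal_lower_neighbourg := by
  intro node nodes _ _
  unfold Spec_lower_neighbourg lower_neighbourg lower_neighbourg_alt
  exact core _ _ nodes
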